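-- pv_equiv track=rewrite | github.com/caseyvanhoof/atlas-sizing-ai | sizing_advisor.py | build_search_topics
-- ===== SOURCE A (Python) =====
-- def build_search_topics(schema_text: str) -> list:
--     """Extract key topics from the schema description for KB search."""
--     topics = [
--         "Atlas cluster sizing tier selection memory working set",
--         "auto-scaling cluster tier reactive predictive configuration",
--         "storage capacity IOPS provisioned NVMe cluster class",
--         "sharding when to shard horizontal scaling",
--         "cluster additional settings oplog configuration",
--     ]
--
--     # Add schema-specific topics based on content
--     lower = schema_text.lower()
--     if "search" in lower or "vector" in lower:
--         topics.append("Atlas Search vector search dedicated nodes")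
--     if "shard" in lower:
--         topics.append("independent shard scaling cluster sharding configuration")
--     if any(w in lower for w in ["nvme", "latency", "low-latency"]):
--         topics.append("NVMe storage low latency ephemeral SSD")
--     if any(w in lower for w in ["version", "upgrade", "8.0", "7.0"]):
--         topics.append("upgrade major MongoDB version FCV considerations")
--     if any(w in lower for w in ["million", "billion", "terabyte", "tb"]):
--         topics.append("large data set memory requirements working set calculation")
--     if any(w in lower for w in ["iops", "throughput", "ops/sec", "writes/sec"]):
--         topics.append("IOPS provisioning throughput performance cluster tier")
--     if any(w in lower for w in ["multi-region", "disaster recovery", "dr", "region"]):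
--         topics.append("multi-region cluster configuration high availability")
--
--     return topics
-- ===== SOURCE B (Python) =====
-- _BASE_TOPICS = [
--     "Atlas cluster sizing tier selection memory working set",
--     "auto-scaling cluster tier reactive predictive configuration",
--     "storage capacity IOPS provisioned NVMe cluster class",
--     "sharding when to shard horizontal scaling",
--     "cluster additional settings oplog configuration",
-- ]
--
-- # Flat inverted index: each keyword maps directly to the topic it triggers.
-- _KEYWORD_TOPIC = [
--     ("search", "Atlas Search vector search dedicated nodes"),
--     ("vector", "Atlas Search vector search dedicated nodes"),
--     ("shard", "independent shard scaling cluster sharding configuration"),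
--     ("nvme", "NVMe storage low latency ephemeral SSD"),
--     ("latency", "NVMe storage low latency ephemeral SSD"),
--     ("low-latency", "NVMe storage low latency ephemeral SSD"),
--     ("version", "upgrade major MongoDB version FCV considerations"),
--     ("upgrade", "upgrade major MongoDB version FCV considerations"),
--     ("8.0", "upgrade major MongoDB version FCV considerations"),
--     ("7.0", "upgrade major MongoDB version FCV considerations"),
--     ("million", "large data set memory requirements working set calculation"),
--     ("billion", "large data set memory requirements working set calculation"),
--     ("terabyte", "large data set memory requirements working set calculation"),
--     ("tb", "large data set memory requirements working set calculation"),
--     ("iops", "IOPS provisioning throughput performance cluster tier"),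
--     ("throughput", "IOPS provisioning throughput performance cluster tier"),
--     ("ops/sec", "IOPS provisioning throughput performance cluster tier"),
--     ("writes/sec", "IOPS provisioning throughput performance cluster tier"),
--     ("multi-region", "multi-region cluster configuration high availability"),
--     ("disaster recovery", "multi-region cluster configuration high availability"),
--     ("dr", "multi-region cluster configuration high availability"),
--     ("region", "multi-region cluster configuration high availability"),
-- ]
--
-- # The conditional topics in output order.
-- _EXTRA_ORDER = [
--     "Atlas Search vector search dedicated nodes",
--     "independent shard scaling cluster sharding configuration",
--     "NVMe storage low latency ephemeral SSD",
--     "upgrade major MongoDB version FCV considerations",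
--     "large data set memory requirements working set calculation",
--     "IOPS provisioning throughput performance cluster tier",
--     "multi-region cluster configuration high availability",
-- ]
--
-- def build_search_topics(schema_text: str) -> list:
--     """Extract key topics from the schema description for KB search."""
--     lower = schema_text.lower()
--     fired = {t for w, t in _KEYWORD_TOPIC if w in lower}
--     return _BASE_TOPICS + [t for t in _EXTRA_ORDER if t in fired]
-- ===== Notes on version B (the rewrite author's own statement) =====
-- stated objective: alternative
-- what changed: Replaces seven sequential conditional appends (each with its own any-over-keywords test) by an inverted flat keyword-to-topic index: one matching pass collects the set of fired topics, then the ordered candidate list is filtered by set membership.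
import Mathlib
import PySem

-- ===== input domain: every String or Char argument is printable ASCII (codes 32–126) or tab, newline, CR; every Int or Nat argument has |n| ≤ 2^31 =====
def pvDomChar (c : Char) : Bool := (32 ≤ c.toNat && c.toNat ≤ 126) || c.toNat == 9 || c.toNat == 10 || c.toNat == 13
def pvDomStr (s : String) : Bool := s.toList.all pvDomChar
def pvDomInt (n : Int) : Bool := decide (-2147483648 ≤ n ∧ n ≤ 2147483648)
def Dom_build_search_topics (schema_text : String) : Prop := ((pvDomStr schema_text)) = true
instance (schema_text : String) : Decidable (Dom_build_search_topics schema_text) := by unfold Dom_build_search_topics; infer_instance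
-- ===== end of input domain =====

-- B replaces A's seven sequential conditional appends by a flat inverted keyword->topic index:
-- one matching pass collects the set of fired topics, then the ordered candidates are filtered by membership.

-- ===== PORT A =====
def build_search_topics (schema_text : String) : List String :=
  let topics : List String := [
    "Atlas cluster sizing tier selection memory working set",
    "auto-scaling cluster tier reactive predictive configuration",
    "storage capacity IOPS provisioned NVMe cluster class",
    "sharding when to shard horizontal scaling",
    "cluster additional settings oplog configuration"]
  let lower := PySem.Str.lower schema_text
  let topics := if PySem.Str.isIn "search" lower || PySem.Str.isIn "vector" lower then
      topics ++ ["Atlas Search vector search dedicated nodes"] else topics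
  let topics := if PySem.Str.isIn "shard" lower then
      topics ++ ["independent shard scaling cluster sharding configuration"] else topics
  let topics := if (["nvme", "latency", "low-latency"] : List String).any (fun w => PySem.Str.isIn w lower) then
      topics ++ ["NVMe storage low latency ephemeral SSD"] else topics
  let topics := if (["version", "upgrade", "8.0", "7.0"] : List String).any (fun w => PySem.Str.isIn w lower) then
      topics ++ ["upgrade major MongoDB version FCV considerations"] else topics
  let topics := if (["million", "billion", "terabyte", "tb"] : List String).any (fun w => PySem.Str.isIn w lower) then
      topics ++ ["large data set memory requirements working set calculation"] else topics
  let topics := if (["iops", "throughput", "ops/sec", "writes/sec"] : List String).any (fun w => PySem.Str.isIn w lower) then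
      topics ++ ["IOPS provisioning throughput performance cluster tier"] else topics
  let topics := if (["multi-region", "disaster recovery", "dr", "region"] : List String).any (fun w => PySem.Str.isIn w lower) then
      topics ++ ["multi-region cluster configuration high availability"] else topics
  topics

-- ===== PORT B =====
def pvBaseTopics : List String := [
  "Atlas cluster sizing tier selection memory working set",
  "auto-scaling cluster tier reactive predictive configuration",
  "storage capacity IOPS provisioned NVMe cluster class",
  "sharding when to shard horizontal scaling",
  "cluster additional settings oplog configuration"]

-- flat inverted index: each keyword maps directly to the topic it triggers
def pvKeywordTopic : List (String × String) := [
  ("search", "Atlas Search vector search dedicated nodes"),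
  ("vector", "Atlas Search vector search dedicated nodes"),
  ("shard", "independent shard scaling cluster sharding configuration"),
  ("nvme", "NVMe storage low latency ephemeral SSD"),
  ("latency", "NVMe storage low latency ephemeral SSD"),
  ("low-latency", "NVMe storage low latency ephemeral SSD"),
  ("version", "upgrade major MongoDB version FCV considerations"),
  ("upgrade", "upgrade major MongoDB version FCV considerations"),
  ("8.0", "upgrade major MongoDB version FCV considerations"),
  ("7.0", "upgrade major MongoDB version FCV considerations"),
  ("million", "large data set memory requirements working set calculation"),
  ("billion", "large data set memory requirements working set calculation"),
  ("terabyte", "large data set memory requirements working set calculation"),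
  ("tb", "large data set memory requirements working set calculation"),
  ("iops", "IOPS provisioning throughput performance cluster tier"),
  ("throughput", "IOPS provisioning throughput performance cluster tier"),
  ("ops/sec", "IOPS provisioning throughput performance cluster tier"),
  ("writes/sec", "IOPS provisioning throughput performance cluster tier"),
  ("multi-region", "multi-region cluster configuration high availability"),
  ("disaster recovery", "multi-region cluster configuration high availability"),
  ("dr", "multi-region cluster configuration high availability"),
  ("region", "multi-region cluster configuration high availability")]

def pvExtraOrder : List String := [
  "Atlas Search vector search dedicated nodes",
  "independent shard scaling cluster sharding configuration",
  "NVMe storage low latency ephemeral SSD",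
  "upgrade major MongoDB version FCV considerations",
  "large data set memory requirements working set calculation",
  "IOPS provisioning throughput performance cluster tier",
  "multi-region cluster configuration high availability"]

-- {t for w, t in _KEYWORD_TOPIC if w in lower}
def pvFired (lower : String) : PySem.Set String :=
  PySem.Set.ofList ((pvKeywordTopic.filter (fun p => PySem.Str.isIn p.1 lower)).map Prod.snd)

def build_search_topics_alt (schema_text : String) : List String :=
  let lower := PySem.Str.lower schema_text
  let fired := pvFired lower
  pvBaseTopics ++ pvExtraOrder.filter (fun t => PySem.Set.contains fired t)

-- ===== PRECONDITION & SPEC =====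
def Spec_build_search_topics (schema_text : String) (out : List String) : Prop := out = build_search_topics_alt schema_text
instance (schema_text : String) (out : List String) : Decidable (Spec_build_search_topics schema_text out) := by unfold Spec_build_search_topics; infer_instance

-- ===== CLAIM (what is proved, stated in full; the proofs are below) =====
def Claim_equal_build_search_topics : Prop := ∀ (schema_text : String), Dom_build_search_topics schema_text → Spec_build_search_topics schema_text (build_search_topics schema_text)

-- ===== LEMMAS AND PROOFS =====

theorem pvFired_c1 (lower : String) :
    PySem.Set.contains (pvFired lower) "Atlas Search vector search dedicated nodes" = (PySem.Str.isIn "search" lower || PySem.Str.isIn "vector" lower) := by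
  rw [Bool.eq_iff_iff, PySem.Set.contains_iff]
  simp [pvFired, PySem.Set.mem_ofList, pvKeywordTopic, List.mem_filter]

theorem pvFired_c2 (lower : String) :
    PySem.Set.contains (pvFired lower) "independent shard scaling cluster sharding configuration" = (PySem.Str.isIn "shard" lower) := by
  rw [Bool.eq_iff_iff, PySem.Set.contains_iff]
  simp [pvFired, PySem.Set.mem_ofList, pvKeywordTopic, List.mem_filter]

theorem pvFired_c3 (lower : String) :
    PySem.Set.contains (pvFired lower) "NVMe storage low latency ephemeral SSD" = (PySem.Str.isIn "nvme" lower || (PySem.Str.isIn "latency" lower || PySem.Str.isIn "low-latency" lower)) := by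
  rw [Bool.eq_iff_iff, PySem.Set.contains_iff]
  simp [pvFired, PySem.Set.mem_ofList, pvKeywordTopic, List.mem_filter]

theorem pvFired_c4 (lower : String) :
    PySem.Set.contains (pvFired lower) "upgrade major MongoDB version FCV considerations" = (PySem.Str.isIn "version" lower || (PySem.Str.isIn "upgrade" lower || (PySem.Str.isIn "8.0" lower || PySem.Str.isIn "7.0" lower))) := by
  rw [Bool.eq_iff_iff, PySem.Set.contains_iff]
  simp [pvFired, PySem.Set.mem_ofList, pvKeywordTopic, List.mem_filter]

theorem pvFired_c5 (lower : String) :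
    PySem.Set.contains (pvFired lower) "large data set memory requirements working set calculation" = (PySem.Str.isIn "million" lower || (PySem.Str.isIn "billion" lower || (PySem.Str.isIn "terabyte" lower || PySem.Str.isIn "tb" lower))) := by
  rw [Bool.eq_iff_iff, PySem.Set.contains_iff]
  simp [pvFired, PySem.Set.mem_ofList, pvKeywordTopic, List.mem_filter]

theorem pvFired_c6 (lower : String) :
    PySem.Set.contains (pvFired lower) "IOPS provisioning throughput performance cluster tier" = (PySem.Str.isIn "iops" lower || (PySem.Str.isIn "throughput" lower || (PySem.Str.isIn "ops/sec" lower || PySem.Str.isIn "writes/sec" lower))) := by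
  rw [Bool.eq_iff_iff, PySem.Set.contains_iff]
  simp [pvFired, PySem.Set.mem_ofList, pvKeywordTopic, List.mem_filter]

theorem pvFired_c7 (lower : String) :
    PySem.Set.contains (pvFired lower) "multi-region cluster configuration high availability" = (PySem.Str.isIn "multi-region" lower || (PySem.Str.isIn "disaster recovery" lower || (PySem.Str.isIn "dr" lower || PySem.Str.isIn "region" lower))) := by
  rw [Bool.eq_iff_iff, PySem.Set.contains_iff]
  simp [pvFired, PySem.Set.mem_ofList, pvKeywordTopic, List.mem_filter]

-- ===== VERDICT (by name: the statement is the Claim_ definition above) =====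
set_option maxHeartbeats 1000000 in
theorem build_search_topics_spec : Claim_equal_build_search_topics := by
  intro s _
  unfold Spec_build_search_topics build_search_topics build_search_topics_alt
  simp only [List.any_cons, List.any_nil, Bool.or_false, pvExtraOrder, pvBaseTopics,
    List.filter_cons, List.filter_nil,
    pvFired_c1 (PySem.Str.lower s), pvFired_c2 (PySem.Str.lower s), pvFired_c3 (PySem.Str.lower s),
    pvFired_c4 (PySem.Str.lower s), pvFired_c5 (PySem.Str.lower s), pvFired_c6 (PySem.Str.lower s),
    pvFired_c7 (PySem.Str.lower s)]
  generalize (PySem.Str.isIn "search" (PySem.Str.lower s) || PySem.Str.isIn "vector" (PySem.Str.lower s)) = b1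
  generalize PySem.Str.isIn "shard" (PySem.Str.lower s) = b2
  generalize (PySem.Str.isIn "nvme" (PySem.Str.lower s) || (PySem.Str.isIn "latency" (PySem.Str.lower s) || PySem.Str.isIn "low-latency" (PySem.Str.lower s))) = b3
  generalize (PySem.Str.isIn "version" (PySem.Str.lower s) || (PySem.Str.isIn "upgrade" (PySem.Str.lower s) || (PySem.Str.isIn "8.0" (PySem.Str.lower s) || PySem.Str.isIn "7.0" (PySem.Str.lower s)))) = b4
  generalize (PySem.Str.isIn "million" (PySem.Str.lower s) || (PySem.Str.isIn "billion" (PySem.Str.lower s) || (PySem.Str.isIn "terabyte" (PySem.Str.lower s) || PySem.Str.isIn "tb" (PySem.Str.lower s)))) = b5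
  generalize (PySem.Str.isIn "iops" (PySem.Str.lower s) || (PySem.Str.isIn "throughput" (PySem.Str.lower s) || (PySem.Str.isIn "ops/sec" (PySem.Str.lower s) || PySem.Str.isIn "writes/sec" (PySem.Str.lower s)))) = b6
  generalize (PySem.Str.isIn "multi-region" (PySem.Str.lower s) || (PySem.Str.isIn "disaster recovery" (PySem.Str.lower s) || (PySem.Str.isIn "dr" (PySem.Str.lower s) || PySem.Str.isIn "region" (PySem.Str.lower s)))) = b7
  cases b1 <;> cases b2 <;> cases b3 <;> cases b4 <;> cases b5 <;> cases b6 <;> cases b7 <;> rfl
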